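-- pv_equiv track=rewrite | github.com/kimwwk/repocrunch | src/repocrunch/extractors/architecture.py | _detect_ci_cd
-- ===== SOURCE A (Python) =====
-- def _detect_ci_cd(paths: set[str]) -> list[str]:
--     ci: list[str] = []
--     if any(p.startswith(".github/workflows/") for p in paths):
--         ci.append("GitHub Actions")
--     if ".gitlab-ci.yml" in paths:
--         ci.append("GitLab CI")
--     if "Jenkinsfile" in paths:
--         ci.append("Jenkins")
--     if ".circleci/config.yml" in paths or ".circleci/config.yaml" in paths:
--         ci.append("CircleCI")
--     if ".travis.yml" in paths:
--         ci.append("Travis CI")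
--     if any(p.startswith("azure-pipelines") for p in paths):
--         ci.append("Azure Pipelines")
--     if "bitbucket-pipelines.yml" in paths:
--         ci.append("Bitbucket Pipelines")
--     return ci
-- ===== SOURCE B (Python) =====
-- def _detect_ci_cd(paths: set[str]) -> list[str]:
--     found: set[str] = set()
--     for p in paths:
--         if p.startswith(".github/workflows/"):
--             found.add("GitHub Actions")
--         elif p.startswith("azure-pipelines"):
--             found.add("Azure Pipelines")
--         elif p == ".gitlab-ci.yml":
--             found.add("GitLab CI")
--         elif p == "Jenkinsfile":
--             found.add("Jenkins")
--         elif p in (".circleci/config.yml", ".circleci/config.yaml"):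
--             found.add("CircleCI")
--         elif p == ".travis.yml":
--             found.add("Travis CI")
--         elif p == "bitbucket-pipelines.yml":
--             found.add("Bitbucket Pipelines")
--     order = ["GitHub Actions", "GitLab CI", "Jenkins", "CircleCI",
--              "Travis CI", "Azure Pipelines", "Bitbucket Pipelines"]
--     return [n for n in order if n in found]
-- ===== Notes on version B (the rewrite author's own statement) =====
-- stated objective: alternative
-- what changed: B makes a single pass over paths, classifying each path into a membership set, then emits the fixed ordered name list filtered by that set, instead of A's seven separate scans/lookups over paths.
import Mathlib
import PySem

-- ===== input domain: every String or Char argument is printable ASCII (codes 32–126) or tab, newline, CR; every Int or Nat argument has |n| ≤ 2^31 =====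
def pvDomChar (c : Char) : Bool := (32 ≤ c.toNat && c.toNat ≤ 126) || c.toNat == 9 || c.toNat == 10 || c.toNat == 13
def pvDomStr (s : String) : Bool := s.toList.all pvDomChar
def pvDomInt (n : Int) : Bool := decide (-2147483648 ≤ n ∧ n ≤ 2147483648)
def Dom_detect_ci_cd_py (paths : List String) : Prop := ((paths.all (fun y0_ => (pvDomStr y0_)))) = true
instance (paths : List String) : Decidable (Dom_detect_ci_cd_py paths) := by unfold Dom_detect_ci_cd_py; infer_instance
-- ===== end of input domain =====

-- B replaces A's seven separate scans/lookups of `paths` with one classifying pass into a set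
-- plus a filter of the fixed ordered name list (alternative decomposition; same output).

-- ===== PORT A =====
def detect_ci_cd_py (paths : List String) : List String :=
  let ci : List String := []
  let ci := if paths.any (fun p => PySem.Str.startswith p ".github/workflows/") then ci ++ ["GitHub Actions"] else ci
  let ci := if paths.contains ".gitlab-ci.yml" then ci ++ ["GitLab CI"] else ci
  let ci := if paths.contains "Jenkinsfile" then ci ++ ["Jenkins"] else ci
  let ci := if paths.contains ".circleci/config.yml" || paths.contains ".circleci/config.yaml" then ci ++ ["CircleCI"] else ci
  let ci := if paths.contains ".travis.yml" then ci ++ ["Travis CI"] else ci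
  let ci := if paths.any (fun p => PySem.Str.startswith p "azure-pipelines") then ci ++ ["Azure Pipelines"] else ci
  let ci := if paths.contains "bitbucket-pipelines.yml" then ci ++ ["Bitbucket Pipelines"] else ci
  ci

-- ===== PORT B =====
def classifyCI (p : String) : Option String :=
  if PySem.Str.startswith p ".github/workflows/" then some "GitHub Actions"
  else if PySem.Str.startswith p "azure-pipelines" then some "Azure Pipelines"
  else if p == ".gitlab-ci.yml" then some "GitLab CI"
  else if p == "Jenkinsfile" then some "Jenkins"
  else if p == ".circleci/config.yml" || p == ".circleci/config.yaml" then some "CircleCI"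
  else if p == ".travis.yml" then some "Travis CI"
  else if p == "bitbucket-pipelines.yml" then some "Bitbucket Pipelines"
  else none

def ciOrder : List String :=
  ["GitHub Actions", "GitLab CI", "Jenkins", "CircleCI", "Travis CI", "Azure Pipelines", "Bitbucket Pipelines"]

def detect_ci_cd_py_alt (paths : List String) : List String :=
  let found : PySem.Set String :=
    paths.foldl (fun s p => match classifyCI p with | some n => PySem.Set.add s n | none => s) PySem.Set.empty
  ciOrder.filter (fun n => PySem.Set.contains found n)

-- ===== PRECONDITION & SPEC =====
def Spec_detect_ci_cd_py (paths : List String) (out : List String) : Prop := out = detect_ci_cd_py_alt paths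
instance (paths : List String) (out : List String) : Decidable (Spec_detect_ci_cd_py paths out) := by unfold Spec_detect_ci_cd_py; infer_instance

-- ===== CLAIM (what is proved, stated in full; the proofs are below) =====
def Claim_equal_detect_ci_cd_py : Prop := ∀ (paths : List String), Dom_detect_ci_cd_py paths → Spec_detect_ci_cd_py paths (detect_ci_cd_py paths)

-- ===== LEMMAS AND PROOFS =====

theorem contains_add (s : PySem.Set String) (m n : String) :
    PySem.Set.contains (PySem.Set.add s m) n = (PySem.Set.contains s n || n == m) := by
  simp [PySem.Set.add, PySem.Set.contains]
  by_cases h : m ∈ s <;> by_cases h2 : n = m <;> simp_all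

theorem contains_empty (n : String) : PySem.Set.contains PySem.Set.empty n = false := by
  simp [PySem.Set.contains, PySem.Set.empty]

theorem contains_foldl (paths : List String) (s : PySem.Set String) (n : String) :
    PySem.Set.contains
      (paths.foldl (fun s p => match classifyCI p with | some n => PySem.Set.add s n | none => s) s) n
    = (PySem.Set.contains s n || paths.any (fun p => classifyCI p == some n)) := by
  induction paths generalizing s with
  | nil => simp
  | cons p ps ih =>
    simp only [List.foldl_cons, List.any_cons]
    cases h : classifyCI p with
    | none =>
      simp only [h, ih]
      simp [h]
    | some m =>
      simp only [ih, contains_add]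
      by_cases hn : n = m
      · subst hn; simp [Bool.or_comm]
      · have h1 : (n == m) = false := by simp [hn]
        have h2 : (some m == some n) = false := by simp [Ne.symm hn]
        simp [h1, h2]

theorem cls_gh (p : String) :
    (classifyCI p == some "GitHub Actions") = PySem.Str.startswith p ".github/workflows/" := by
  by_cases h : PySem.Str.startswith p ".github/workflows/" = true
  · unfold classifyCI; rw [if_pos h, h]; rfl
  · unfold classifyCI
    rw [if_neg h]
    simp only [Bool.not_eq_true] at h
    rw [h]
    split_ifs <;> simp_all

theorem cls_az (p : String) :
    (classifyCI p == some "Azure Pipelines") = PySem.Str.startswith p "azure-pipelines" := by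
  by_cases h : PySem.Str.startswith p "azure-pipelines" = true
  · have h0 : ¬ PySem.Str.startswith p ".github/workflows/" = true := by
      intro hc
      simp only [PySem.Str.startswith_eq] at h hc
      rw [PySem.Chars.startswith_iff] at h hc
      obtain ⟨t, ht⟩ := h
      rw [← ht] at hc
      simp [List.cons_prefix_cons] at hc
    unfold classifyCI
    rw [if_neg h0, if_pos h, h]
    rfl
  · unfold classifyCI
    simp only [Bool.not_eq_true] at h
    rw [h]
    split_ifs <;> simp_all

theorem cls_gl (p : String) :
    (classifyCI p == some "GitLab CI") = (p == ".gitlab-ci.yml") := by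
  by_cases hp : p = ".gitlab-ci.yml"
  · subst hp; decide
  · have hr : (p == ".gitlab-ci.yml") = false := by simp [hp]
    rw [hr]
    unfold classifyCI
    split_ifs <;> simp_all

theorem cls_jk (p : String) :
    (classifyCI p == some "Jenkins") = (p == "Jenkinsfile") := by
  by_cases hp : p = "Jenkinsfile"
  · subst hp; decide
  · have hr : (p == "Jenkinsfile") = false := by simp [hp]
    rw [hr]
    unfold classifyCI
    split_ifs <;> simp_all

theorem cls_cc (p : String) :
    (classifyCI p == some "CircleCI") = (p == ".circleci/config.yml" || p == ".circleci/config.yaml") := by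
  by_cases hp : p = ".circleci/config.yml"
  · subst hp; decide
  · by_cases hq : p = ".circleci/config.yaml"
    · subst hq; decide
    · have hr : (p == ".circleci/config.yml" || p == ".circleci/config.yaml") = false := by simp [hp, hq]
      rw [hr]
      unfold classifyCI
      split_ifs <;> simp_all

theorem cls_tv (p : String) :
    (classifyCI p == some "Travis CI") = (p == ".travis.yml") := by
  by_cases hp : p = ".travis.yml"
  · subst hp; decide
  · have hr : (p == ".travis.yml") = false := by simp [hp]
    rw [hr]
    unfold classifyCI
    split_ifs <;> simp_all

theorem cls_bb (p : String) :
    (classifyCI p == some "Bitbucket Pipelines") = (p == "bitbucket-pipelines.yml") := by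
  by_cases hp : p = "bitbucket-pipelines.yml"
  · subst hp; decide
  · have hr : (p == "bitbucket-pipelines.yml") = false := by simp [hp]
    rw [hr]
    unfold classifyCI
    split_ifs <;> simp_all

theorem any_or_split (l : List String) (f g : String → Bool) :
    (l.any fun p => f p || g p) = (l.any f || l.any g) := by
  induction l with
  | nil => simp
  | cons x xs ih => simp [ih]; cases f x <;> cases g x <;> simp [Bool.or_comm]

theorem contains_eq_any (l : List String) (a : String) :
    l.contains a = l.any (fun p => p == a) := by
  induction l with
  | nil => rfl
  | cons x xs ih =>
    simp only [List.contains_cons, List.any_cons, ih]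
    have hsym : (a == x) = (x == a) := by
      by_cases h : a = x
      · subst h; rfl
      · simp [h, Ne.symm h]
    rw [hsym]

-- ===== VERDICT (by name: the statement is the Claim_ definition above) =====
set_option maxHeartbeats 2000000 in
theorem detect_ci_cd_py_spec : Claim_equal_detect_ci_cd_py := by
  intro paths _
  show detect_ci_cd_py paths = detect_ci_cd_py_alt paths
  unfold detect_ci_cd_py detect_ci_cd_py_alt ciOrder
  simp only [List.filter_cons, List.filter_nil]
  simp only [contains_foldl, contains_empty, Bool.false_or]
  simp only [cls_gh, cls_az, cls_gl, cls_jk, cls_cc, cls_tv, cls_bb]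
  simp only [any_or_split, contains_eq_any, List.nil_append]
  split_ifs <;> rfl
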